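-- pv_equiv track=rewrite | github.com/BrooksLabUCSC/flair | src/flair/flair_straightfrombam.py | getexonsfromjuncs
-- ===== SOURCE A (Python) =====
-- def getexonsfromjuncs(juncs, start, end):
--     if len(juncs) == 0:
--         estarts = [0]
--         esizes = [end - start]
--     else:
--         estarts = [0] + [x[1] - start for x in juncs]
--         esizes = [juncs[0][0] - start] + [juncs[i + 1][0] - juncs[i][1] for i in range(len(juncs) - 1)] + [
--             end - juncs[-1][1]]
--     return estarts, esizes
-- ===== SOURCE B (Python) =====
-- def getexonsfromjuncs(juncs, start, end):
--     estarts, esizes = [], []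
--     exon_start = start
--     for js, je in juncs:
--         estarts.append(exon_start - start)
--         esizes.append(js - exon_start)
--         exon_start = je
--     estarts.append(exon_start - start)
--     esizes.append(end - exon_start)
--     return estarts, esizes
-- ===== Notes on version B (the rewrite author's own statement) =====
-- stated objective: simpler
-- what changed: Replaces the empty/non-empty branch and the three concatenated comprehensions with paired indexing (juncs[i+1][0]-juncs[i][1]) by one forward pass that keeps a running exon_start accumulator and appends the final exon after the loop, handling the empty case uniformly.
import Mathlib
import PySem

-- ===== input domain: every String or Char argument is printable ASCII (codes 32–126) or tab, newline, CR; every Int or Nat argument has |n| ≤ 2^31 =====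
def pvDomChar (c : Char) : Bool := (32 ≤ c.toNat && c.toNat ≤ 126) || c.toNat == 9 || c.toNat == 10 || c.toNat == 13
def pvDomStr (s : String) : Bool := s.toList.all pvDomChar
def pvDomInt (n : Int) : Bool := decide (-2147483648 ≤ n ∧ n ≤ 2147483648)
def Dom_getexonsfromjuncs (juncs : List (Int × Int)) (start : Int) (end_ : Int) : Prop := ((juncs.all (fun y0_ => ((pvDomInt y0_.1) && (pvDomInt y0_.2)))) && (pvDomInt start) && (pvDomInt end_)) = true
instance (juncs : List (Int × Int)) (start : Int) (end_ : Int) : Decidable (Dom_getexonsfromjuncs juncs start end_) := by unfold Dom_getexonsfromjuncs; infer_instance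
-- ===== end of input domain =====

-- B replaces A's empty/non-empty branch and its three concatenated comprehensions by one
-- forward pass with a running exon_start accumulator (objective: simpler).

-- ===== PORT A =====
def getexonsfromjuncs (juncs : List (Int × Int)) (start : Int) (end_ : Int) : List Int × List Int :=
  if juncs.length == 0 then
    ([0], [end_ - start])
  else
    let estarts : List Int := 0 :: juncs.map (fun x => x.2 - start)
    let esizes : List Int :=
      ((PySem.List.pyGetD juncs 0 (0, 0)).1 - start) ::
        ((PySem.List.pyRange 0 ((juncs.length : Int) - 1) 1).map (fun i =>
          (PySem.List.pyGetD juncs (i + 1) (0, 0)).1 - (PySem.List.pyGetD juncs i (0, 0)).2))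
        ++ [end_ - (PySem.List.pyGetD juncs (-1) (0, 0)).2]
    (estarts, esizes)

-- ===== PORT B =====
def getexonsfromjuncs_alt (juncs : List (Int × Int)) (start : Int) (end_ : Int) : List Int × List Int :=
  let st := juncs.foldl
    (fun (st : List Int × List Int × Int) j =>
      (st.1 ++ [st.2.2 - start], st.2.1 ++ [j.1 - st.2.2], j.2))
    ([], [], start)
  (st.1 ++ [st.2.2 - start], st.2.1 ++ [end_ - st.2.2])

-- ===== PRECONDITION & SPEC =====
def Spec_getexonsfromjuncs (juncs : List (Int × Int)) (start : Int) (end_ : Int) (out : List Int × List Int) : Prop := out = getexonsfromjuncs_alt juncs start end_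
instance (juncs : List (Int × Int)) (start : Int) (end_ : Int) (out : List Int × List Int) : Decidable (Spec_getexonsfromjuncs juncs start end_ out) := by unfold Spec_getexonsfromjuncs; infer_instance

-- ===== CLAIM (what is proved, stated in full; the proofs are below) =====
def Claim_equal_getexonsfromjuncs : Prop := ∀ (juncs : List (Int × Int)) (start : Int) (end_ : Int), Dom_getexonsfromjuncs juncs start end_ → Spec_getexonsfromjuncs juncs start end_ (getexonsfromjuncs juncs start end_)

-- ===== LEMMAS AND PROOFS =====

-- The per-junction contributions of B's loop, as a structural recursion on juncs
-- (estarts so far, esizes so far, current exon_start).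
def pvSpine (start : Int) : List (Int × Int) → Int → List Int × List Int × Int
  | [], x => ([], [], x)
  | j :: rest, x =>
    let r := pvSpine start rest j.2
    ((x - start) :: r.1, (j.1 - x) :: r.2.1, r.2.2)

theorem foldl_eq_pvSpine (start : Int) :
    ∀ (juncs : List (Int × Int)) (x : Int) (a1 a2 : List Int),
      juncs.foldl
        (fun (st : List Int × List Int × Int) j =>
          (st.1 ++ [st.2.2 - start], st.2.1 ++ [j.1 - st.2.2], j.2)) (a1, a2, x)
      = (a1 ++ (pvSpine start juncs x).1, a2 ++ (pvSpine start juncs x).2.1,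
         (pvSpine start juncs x).2.2) := by
  intro juncs
  induction juncs with
  | nil => intro x a1 a2; simp [pvSpine]
  | cons j rest ih =>
    intro x a1 a2
    simp only [List.foldl_cons, pvSpine, ih]
    simp

theorem pvSpine_closed (start : Int) :
    ∀ (rest : List (Int × Int)) (j : Int × Int) (x : Int),
      pvSpine start (j :: rest) x =
        ((x - start) :: ((j :: rest).zip rest).map (fun pq => pq.1.2 - start),
         (j.1 - x) :: ((j :: rest).zip rest).map (fun pq => pq.2.1 - pq.1.2),
         ((j :: rest).getLast (by simp)).2) := by
  intro rest
  induction rest with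
  | nil => intro j x; simp [pvSpine]
  | cons k rest ih =>
    intro j x
    show ((x - start) :: (pvSpine start (k :: rest) j.2).1,
          (j.1 - x) :: (pvSpine start (k :: rest) j.2).2.1,
          (pvSpine start (k :: rest) j.2).2.2) = _
    rw [ih k j.2]
    simp [List.getLast]

theorem map_fst_zip_tail {α β : Type} (g : α → β) :
    ∀ (rest : List α) (j : α),
      ((j :: rest).zip rest).map (fun pq => g pq.1) = (j :: rest).dropLast.map g := by
  intro rest
  induction rest with
  | nil => simp
  | cons b l ih => intro j; simp_all

theorem getexonsfromjuncs_spec_aux (juncs : List (Int × Int)) (start end_ : Int) :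
    getexonsfromjuncs juncs start end_ = getexonsfromjuncs_alt juncs start end_ := by
  unfold getexonsfromjuncs getexonsfromjuncs_alt
  cases juncs with
  | nil => simp
  | cons j rest =>
    simp only [List.length_cons, beq_iff_eq, Nat.succ_ne_zero, if_false,
      foldl_eq_pvSpine, pvSpine_closed, List.nil_append]
    rw [Prod.mk.injEq]
    constructor
    · -- estarts
      have h := List.dropLast_concat_getLast (l := j :: rest) (by simp)
      calc (0 : Int) :: (j :: rest).map (fun x => x.2 - start)
          = 0 :: ((j :: rest).dropLast.map (fun x => x.2 - start)
              ++ [((j :: rest).getLast (by simp)).2 - start]) := by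
            conv_lhs => rw [← h]
            simp
        _ = _ := by
            rw [map_fst_zip_tail (fun x => x.2 - start) rest j]
            simp
    · -- esizes
      rw [PySem.List.pyGetD_zero_cons, PySem.List.pyGetD_neg_one (j :: rest) ((0:Int),(0:Int)) (List.cons_ne_nil j rest)]
      simp only [List.cons_append]
      congr 1
      congr 1
      -- the middle comprehension equals the zip form
      apply List.ext_getElem
      · simp [PySem.List.length_pyRange_one]
      · intro k hk1 hk2
        have hkr : k < rest.length := by
          simpa [List.length_zip] using hk2
        rw [List.getElem_map, PySem.List.getElem_pyRange_one]
        have e1 : PySem.List.pyGetD (j :: rest) ((0 : Int) + (k : Int) + 1) ((0 : Int), (0 : Int))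
            = (j :: rest)[k + 1]'(by simp; omega) := by
          have hc : ((0 : Int) + (k : Int) + 1) = ((k + 1 : Nat) : Int) := by push_cast; ring
          rw [hc, PySem.List.pyGetD_natCast]
          exact List.getD_eq_getElem _ _ (by simp; omega)
        have e2 : PySem.List.pyGetD (j :: rest) ((0 : Int) + (k : Int)) ((0 : Int), (0 : Int))
            = (j :: rest)[k]'(by simp; omega) := by
          have hc : ((0 : Int) + (k : Int)) = ((k : Nat) : Int) := by ring
          rw [hc, PySem.List.pyGetD_natCast]
          exact List.getD_eq_getElem _ _ (by simp; omega)
        rw [e1, e2, List.getElem_map, List.getElem_zip]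
        simp

-- ===== VERDICT (by name: the statement is the Claim_ definition above) =====
theorem getexonsfromjuncs_spec : Claim_equal_getexonsfromjuncs := by
  intro juncs start end_ _
  exact getexonsfromjuncs_spec_aux juncs start end_
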